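-- pv_equiv track=rewrite | github.com/130-jwang3/CMPT413_final_project | Datasets/Dataset.py | get_ranges_from_points
-- ===== SOURCE A (Python) =====
-- def get_ranges_from_points(point_list: list, continue_thres: int = 1):
--     if point_list == []:
--         return []
--     start_idx = point_list[0]
--     ranges_list = []
--     for i in range(1, len(point_list)):
--         if point_list[i] - point_list[i-1] > continue_thres:
--             ranges_list.append((start_idx, point_list[i-1]+1))
--             start_idx = point_list[i]
--     ranges_list.append((start_idx, point_list[-1]+1))
--     return ranges_list
-- ===== SOURCE B (Python) =====
-- def get_ranges_from_points(point_list: list, continue_thres: int = 1):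
--     if point_list == []:
--         return []
--     breaks = [i for i in range(1, len(point_list))
--               if point_list[i] - point_list[i-1] > continue_thres]
--     starts = [point_list[0]] + [point_list[i] for i in breaks]
--     ends = [point_list[i-1] + 1 for i in breaks] + [point_list[-1] + 1]
--     return list(zip(starts, ends))
-- ===== Notes on version B (the rewrite author's own statement) =====
-- stated objective: alternative
-- what changed: Replaces the stateful emit-as-you-go loop (carrying start_idx and appending on each gap) with two separate passes: first compute the break indices by a filter, then assemble the start and end lists independently and zip them.
import Mathlib
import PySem

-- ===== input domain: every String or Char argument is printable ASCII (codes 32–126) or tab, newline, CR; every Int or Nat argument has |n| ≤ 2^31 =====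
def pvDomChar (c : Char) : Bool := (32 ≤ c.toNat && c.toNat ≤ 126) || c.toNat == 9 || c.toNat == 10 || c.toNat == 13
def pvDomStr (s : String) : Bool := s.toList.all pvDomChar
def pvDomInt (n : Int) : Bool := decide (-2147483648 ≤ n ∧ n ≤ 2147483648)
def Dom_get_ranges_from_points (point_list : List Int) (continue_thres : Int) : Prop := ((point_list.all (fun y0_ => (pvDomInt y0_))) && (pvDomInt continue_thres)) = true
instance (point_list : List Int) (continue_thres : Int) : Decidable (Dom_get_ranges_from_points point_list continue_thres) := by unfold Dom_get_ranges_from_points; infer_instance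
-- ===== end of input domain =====

-- B replaces A's stateful emit-as-you-go loop by two passes: filter the break
-- indices, then build the start/end lists separately and zip them (objective: alternative).

-- ===== PORT A =====
def get_ranges_from_points (point_list : List Int) (continue_thres : Int) : List (Int × Int) :=
  if point_list = [] then []
  else
    let start_idx := PySem.List.pyGetD point_list 0 0
    let st := (PySem.List.pyRange 1 point_list.length 1).foldl
      (fun (s : Int × List (Int × Int)) i =>
        if PySem.List.pyGetD point_list i 0 - PySem.List.pyGetD point_list (i-1) 0 > continue_thres then
          (PySem.List.pyGetD point_list i 0, s.2 ++ [(s.1, PySem.List.pyGetD point_list (i-1) 0 + 1)])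
        else s)
      (start_idx, [])
    st.2 ++ [(st.1, PySem.List.pyGetD point_list (-1) 0 + 1)]

-- ===== PORT B =====
def get_ranges_from_points_alt (point_list : List Int) (continue_thres : Int) : List (Int × Int) :=
  if point_list = [] then []
  else
    let breaks := (PySem.List.pyRange 1 point_list.length 1).filter
      (fun i => PySem.List.pyGetD point_list i 0 - PySem.List.pyGetD point_list (i-1) 0 > continue_thres)
    let starts := [PySem.List.pyGetD point_list 0 0] ++ breaks.map (fun i => PySem.List.pyGetD point_list i 0)
    let ends := breaks.map (fun i => PySem.List.pyGetD point_list (i-1) 0 + 1) ++ [PySem.List.pyGetD point_list (-1) 0 + 1]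
    starts.zip ends

-- ===== PRECONDITION & SPEC =====
def Spec_get_ranges_from_points (point_list : List Int) (continue_thres : Int) (out : List (Int × Int)) : Prop := out = get_ranges_from_points_alt point_list continue_thres
instance (point_list : List Int) (continue_thres : Int) (out : List (Int × Int)) : Decidable (Spec_get_ranges_from_points point_list continue_thres out) := by unfold Spec_get_ranges_from_points; infer_instance

-- ===== CLAIM (what is proved, stated in full; the proofs are below) =====
def Claim_equal_get_ranges_from_points : Prop := ∀ (point_list : List Int) (continue_thres : Int), Dom_get_ranges_from_points point_list continue_thres → Spec_get_ranges_from_points point_list continue_thres (get_ranges_from_points point_list continue_thres)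

-- ===== LEMMAS AND PROOFS =====

/-- A's loop, run over an arbitrary index list: the final `start_idx` is the last
filtered start (or the initial one), and the emitted pairs are the zip of the
start list (shifted by the initial start) with the end list. -/
theorem fold_char (p : Int → Prop) [DecidablePred p] (v e : Int → Int)
    (L : List Int) (s0 : Int) (acc : List (Int × Int)) :
    L.foldl (fun (s : Int × List (Int × Int)) i =>
        if p i then (v i, s.2 ++ [(s.1, e i)]) else s) (s0, acc)
    = (((L.filter (fun i => p i)).map v).getLastD s0,
       acc ++ List.zip (s0 :: (L.filter (fun i => p i)).map v) ((L.filter (fun i => p i)).map e)) := by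
  induction L generalizing s0 acc with
  | nil => simp
  | cons i L ih =>
    by_cases h : p i
    · rw [List.foldl_cons, if_pos h, ih, List.filter_cons_of_pos (by simpa using h)]
      simp only [List.map_cons, List.zip_cons_cons, List.getLastD_cons, List.append_assoc,
        List.cons_append, List.nil_append]
    · rw [List.foldl_cons, if_neg h, ih, List.filter_cons_of_neg (by simpa using h)]

theorem zip_snoc (s0 : Int) (vs es : List Int) (h : vs.length = es.length) (eL : Int) :
    List.zip (s0 :: vs) (es ++ [eL]) = List.zip (s0 :: vs) es ++ [(vs.getLastD s0, eL)] := by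
  induction vs generalizing s0 es with
  | nil =>
    cases es with
    | nil => simp
    | cons b es => simp at h
  | cons a vs ih =>
    cases es with
    | nil => simp at h
    | cons b es =>
      simp only [List.cons_append, List.zip_cons_cons, List.getLastD_cons]
      rw [ih a es (by simpa using h)]

-- ===== VERDICT (by name: the statement is the Claim_ definition above) =====
theorem get_ranges_from_points_spec : Claim_equal_get_ranges_from_points := by
  intro pl t _
  unfold Spec_get_ranges_from_points get_ranges_from_points get_ranges_from_points_alt
  by_cases h : pl = []
  · simp [h]
  · simp only [if_neg h]
    rw [fold_char]
    simp only [List.singleton_append]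
    rw [zip_snoc _ _ _ (by simp)]
    simp
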